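-- pv_equiv track=rewrite | github.com/jackruan99/hightowers | hightowers3.py | check_obstacles
-- ===== SOURCE A (Python) =====
-- def convert_finite(obstacles):
--     finite_obstacles = []
--     for point1, point2 in obstacles:
--         finite_obstacle = []
--         changex = point2[0] - point1[0]
--         changey = point2[1] - point1[1]
--         if changex != 0:
--             step = 1 if changex > 0 else -1
--             for i in range(0, changex+step, step):
--                 finite_obstacle.append((point1[0]+i, point1[1]))
--         if changey != 0:
--             step = 1 if changey > 0 else -1
--             for i in range(0, changey+step, step):
--                 finite_obstacle.append((point1[0], point1[1]+i))
--         finite_obstacles.append(finite_obstacle)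
--     return finite_obstacles
--
-- def hit_obstacle(point, obstacles):
--     for obstacle in obstacles:
--         if point in obstacle:
--             return True
--     return False
--
-- def check_obstacles(intersection, line1, line2, obstacles):
--     finite_lines = convert_finite(
--         [(line1[0], intersection), (line2[0], intersection)])
--     for line in finite_lines:
--         for point in line:
--             if hit_obstacle(point, obstacles):
--                 return True
--     return False
-- ===== SOURCE B (Python) =====
-- def check_obstacles(intersection, line1, line2, obstacles):
--     def on_path(start, q):
--         dx = intersection[0] - start[0]
--         dy = intersection[1] - start[1]
--         return ((dx != 0 and q[1] == start[1]
--                  and min(start[0], start[0] + dx) <= q[0] <= max(start[0], start[0] + dx))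
--                 or (dy != 0 and q[0] == start[0]
--                     and min(start[1], start[1] + dy) <= q[1] <= max(start[1], start[1] + dy)))
--     return any(on_path(start, q)
--                for start in (line1[0], line2[0])
--                for obstacle in obstacles
--                for q in obstacle)
-- ===== Notes on version B (the rewrite author's own statement) =====
-- stated objective: faster
-- what changed: B drops convert_finite/hit_obstacle: instead of materialising every lattice point of the two L-shaped paths and scanning obstacles for each, it tests each obstacle point directly against a closed-form on-segment condition (equal coordinate plus inclusive interval bound, guarded by nonzero delta).
import Mathlib
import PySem

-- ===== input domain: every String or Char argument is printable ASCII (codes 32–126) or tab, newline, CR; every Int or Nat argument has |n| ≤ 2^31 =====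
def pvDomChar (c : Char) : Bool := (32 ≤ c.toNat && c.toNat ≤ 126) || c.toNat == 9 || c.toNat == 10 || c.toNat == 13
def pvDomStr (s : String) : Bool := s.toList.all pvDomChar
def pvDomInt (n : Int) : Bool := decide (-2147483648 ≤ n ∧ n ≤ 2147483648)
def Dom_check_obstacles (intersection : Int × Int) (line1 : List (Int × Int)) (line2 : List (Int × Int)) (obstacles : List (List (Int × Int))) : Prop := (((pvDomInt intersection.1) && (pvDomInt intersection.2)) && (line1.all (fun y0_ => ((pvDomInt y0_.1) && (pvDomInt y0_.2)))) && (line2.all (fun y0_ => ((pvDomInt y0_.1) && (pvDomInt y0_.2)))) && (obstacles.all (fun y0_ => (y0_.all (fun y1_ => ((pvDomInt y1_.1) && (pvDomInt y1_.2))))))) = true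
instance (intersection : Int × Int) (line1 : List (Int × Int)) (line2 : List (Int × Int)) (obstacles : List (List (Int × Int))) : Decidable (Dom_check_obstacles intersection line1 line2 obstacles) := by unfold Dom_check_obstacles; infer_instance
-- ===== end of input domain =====

-- B replaces A's explicit enumeration of the L-path's lattice points by a direct
-- geometric on-segment test of each obstacle point (objective: simpler).

-- ===== PORT A =====
-- the per-segment body of convert_finite's loop: the list of lattice points of the L-path p1→p2
def segPoints (p1 p2 : Int × Int) : List (Int × Int) :=
  let changex := p2.1 - p1.1
  let changey := p2.2 - p1.2
  (if changex ≠ 0 then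
     (PySem.List.pyRange 0 (changex + (if changex > 0 then 1 else -1)) (if changex > 0 then 1 else -1)).map
       (fun i => (p1.1 + i, p1.2))
   else []) ++
  (if changey ≠ 0 then
     (PySem.List.pyRange 0 (changey + (if changey > 0 then 1 else -1)) (if changey > 0 then 1 else -1)).map
       (fun i => (p1.1, p1.2 + i))
   else [])

def convert_finite (obstacles : List ((Int × Int) × (Int × Int))) : List (List (Int × Int)) :=
  obstacles.map (fun pq => segPoints pq.1 pq.2)

def hit_obstacle (point : Int × Int) (obstacles : List (List (Int × Int))) : Bool :=
  obstacles.any (fun obstacle => obstacle.contains point)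

def check_obstacles (intersection : Int × Int) (line1 : List (Int × Int)) (line2 : List (Int × Int)) (obstacles : List (List (Int × Int))) : Bool :=
  -- line1[0] / line2[0]: IndexError on an empty list, excluded by Pre_
  match PySem.List.pyGet? line1 0, PySem.List.pyGet? line2 0 with
  | some p1, some p2 =>
    let finite_lines := convert_finite [(p1, intersection), (p2, intersection)]
    finite_lines.any (fun line => line.any (fun point => hit_obstacle point obstacles))
  | _, _ => false

-- ===== PORT B =====
def on_path (intersection start q : Int × Int) : Bool :=
  let dx := intersection.1 - start.1
  let dy := intersection.2 - start.2
  (dx != 0 && q.2 == start.2 &&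
     decide (min start.1 (start.1 + dx) ≤ q.1) && decide (q.1 ≤ max start.1 (start.1 + dx)))
  || (dy != 0 && q.1 == start.1 &&
     decide (min start.2 (start.2 + dy) ≤ q.2) && decide (q.2 ≤ max start.2 (start.2 + dy)))

def check_obstacles_alt (intersection : Int × Int) (line1 : List (Int × Int)) (line2 : List (Int × Int)) (obstacles : List (List (Int × Int))) : Bool :=
  -- line1[0] / line2[0]: IndexError on an empty list, excluded by Pre_
  match PySem.List.pyGet? line1 0 with
  | none => false
  | some s1 =>
    match PySem.List.pyGet? line2 0 with
    | none => false
    | some s2 =>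
      [s1, s2].any (fun start =>
        obstacles.any (fun obstacle => obstacle.any (on_path intersection start)))

-- ===== PRECONDITION & SPEC =====
-- Pre_ excludes only the inputs on which Python A raises IndexError (empty line1 or line2).
def Pre_check_obstacles (intersection : Int × Int) (line1 : List (Int × Int)) (line2 : List (Int × Int)) (obstacles : List (List (Int × Int))) : Prop :=
  line1 ≠ [] ∧ line2 ≠ []
instance (intersection : Int × Int) (line1 : List (Int × Int)) (line2 : List (Int × Int)) (obstacles : List (List (Int × Int))) : Decidable (Pre_check_obstacles intersection line1 line2 obstacles) := by unfold Pre_check_obstacles; infer_instance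

def pvWitness_check_obstacles : (Int × Int) × (List (Int × Int)) × (List (Int × Int)) × (List (List (Int × Int))) :=
  ((2, 2), [(0, 2)], [(2, 0)], [[(1, 2)], [(5, 5)]])

def Spec_check_obstacles (intersection : Int × Int) (line1 : List (Int × Int)) (line2 : List (Int × Int)) (obstacles : List (List (Int × Int))) (out : Bool) : Prop := out = check_obstacles_alt intersection line1 line2 obstacles
instance (intersection : Int × Int) (line1 : List (Int × Int)) (line2 : List (Int × Int)) (obstacles : List (List (Int × Int))) (out : Bool) : Decidable (Spec_check_obstacles intersection line1 line2 obstacles out) := by unfold Spec_check_obstacles; infer_instance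

-- ===== CLAIM (what is proved, stated in full; the proofs are below) =====
def Claim_equal_check_obstacles : Prop := ∀ (intersection : Int × Int) (line1 : List (Int × Int)) (line2 : List (Int × Int)) (obstacles : List (List (Int × Int))), Dom_check_obstacles intersection line1 line2 obstacles → Pre_check_obstacles intersection line1 line2 obstacles → Spec_check_obstacles intersection line1 line2 obstacles (check_obstacles intersection line1 line2 obstacles)

-- ===== LEMMAS AND PROOFS =====

-- membership in A's per-segment range list, both step signs at once
theorem mem_stepRange (c i : Int) :
    i ∈ PySem.List.pyRange 0 (c + (if c > 0 then 1 else -1)) (if c > 0 then 1 else -1) ↔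
      (0 ≤ i ∧ i ≤ c) ∨ (c ≤ i ∧ i ≤ 0) := by
  by_cases h : c > 0
  · rw [if_pos h, PySem.List.mem_pyRange_one]; omega
  · rw [if_neg h, PySem.List.mem_pyRange_neg_one]; omega

-- the horizontal branch of segPoints, characterised
theorem mem_hbranch (a b c q1 q2 : Int) :
    ((q1, q2) ∈ if c ≠ 0 then
        (PySem.List.pyRange 0 (c + (if c > 0 then 1 else -1)) (if c > 0 then 1 else -1)).map
          (fun i => (a + i, b))
      else ([] : List (Int × Int))) ↔
      (c ≠ 0 ∧ q2 = b ∧ min a (a + c) ≤ q1 ∧ q1 ≤ max a (a + c)) := by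
  by_cases hc : c = 0
  · simp [hc]
  · rw [if_pos hc]
    simp only [List.mem_map, mem_stepRange c _, Prod.mk.injEq]
    constructor
    · rintro ⟨i, hi, rfl, rfl⟩
      exact ⟨hc, rfl, by omega, by omega⟩
    · rintro ⟨_, rfl, hlo, hhi⟩
      exact ⟨q1 - a, by omega, by omega, rfl⟩

-- the vertical branch of segPoints, characterised
theorem mem_vbranch (a b c q1 q2 : Int) :
    ((q1, q2) ∈ if c ≠ 0 then
        (PySem.List.pyRange 0 (c + (if c > 0 then 1 else -1)) (if c > 0 then 1 else -1)).map
          (fun i => (a, b + i))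
      else ([] : List (Int × Int))) ↔
      (c ≠ 0 ∧ q1 = a ∧ min b (b + c) ≤ q2 ∧ q2 ≤ max b (b + c)) := by
  by_cases hc : c = 0
  · simp [hc]
  · rw [if_pos hc]
    simp only [List.mem_map, mem_stepRange c _, Prod.mk.injEq]
    constructor
    · rintro ⟨i, hi, rfl, rfl⟩
      exact ⟨hc, rfl, by omega, by omega⟩
    · rintro ⟨_, rfl, hlo, hhi⟩
      exact ⟨q2 - b, by omega, rfl, by omega⟩

-- a point lies on A's materialised L-path iff B's geometric test accepts it
theorem mem_segPoints (p1 p2 q : Int × Int) :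
    q ∈ segPoints p1 p2 ↔ on_path p2 p1 q = true := by
  rcases p1 with ⟨x1, y1⟩
  rcases p2 with ⟨x2, y2⟩
  rcases q with ⟨qx, qy⟩
  simp only [segPoints, on_path, List.mem_append, mem_hbranch, mem_vbranch,
    Bool.or_eq_true, Bool.and_eq_true, bne_iff_ne, beq_iff_eq, decide_eq_true_eq]
  tauto

-- per start point, A's scan of its path equals B's scan of the obstacle points
theorem seg_any_eq (I s : Int × Int) (obstacles : List (List (Int × Int))) :
    (segPoints s I).any (fun point => hit_obstacle point obstacles)
      = obstacles.any (fun obstacle => obstacle.any (on_path I s)) := by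
  rw [Bool.eq_iff_iff]
  simp only [List.any_eq_true, hit_obstacle, List.contains_iff_mem, mem_segPoints]
  constructor
  · rintro ⟨pt, hpt, o, ho, hmem⟩
    exact ⟨o, ho, pt, hmem, hpt⟩
  · rintro ⟨o, ho, pt, hmem, hpt⟩
    exact ⟨pt, hpt, o, ho, hmem⟩

-- ===== VERDICT (by name: the statement is the Claim_ definition above) =====
theorem check_obstacles_spec : Claim_equal_check_obstacles := by
  intro I line1 line2 obstacles _ hpre
  obtain ⟨h1, h2⟩ := hpre
  rcases line1 with _ | ⟨s1, t1⟩; · exact absurd rfl h1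
  rcases line2 with _ | ⟨s2, t2⟩; · exact absurd rfl h2
  unfold Spec_check_obstacles check_obstacles check_obstacles_alt
  simp only [PySem.List.pyGet?, PySem.List.pyIdx?]
  norm_num [convert_finite, List.any_cons, List.any_nil, seg_any_eq]
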